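-- pv_equiv track=rewrite | github.com/athuls/android_monitor | salsa/ProfiledData/BatteryRateProfile/.idea/energy/battery/solve_sys/solve_eqns.py | create_sys_of_eqns
-- ===== SOURCE A (Python) =====
-- def create_sys_of_eqns(actor_names, full_data):
--     sys_eqns_lhs = {}
--     sys_eqns_rhs = []
--     for a in actor_names:
--         sys_eqns_lhs[a] = []
--     for batteryDropInterval in full_data:
--         batteryDropIntervalLength = len(batteryDropInterval)
--         curr_eqn = {}
--         for a in actor_names:
--             curr_eqn[a] = {}
--         for sample in batteryDropInterval:
--             for actor_name in actor_names:
--                 if actor_name in sample: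
--                     if sample[actor_name] in curr_eqn[actor_name]:
--                         curr_eqn[actor_name][sample[actor_name]] += 1
--                     else:
--                         curr_eqn[actor_name][sample[actor_name]] = 1
--                 else:
--                     if 0 in curr_eqn[actor_name]:
--                         curr_eqn[actor_name][0] += 1
--                     else:
--                         curr_eqn[actor_name][0] = 1
--         for actor_name in curr_eqn:
--             sys_eqns_lhs[actor_name].append(curr_eqn[actor_name])
--         sys_eqns_rhs.append(batteryDropIntervalLength)
--
--     return sys_eqns_lhs, sys_eqns_rhs
-- ===== SOURCE B (Python) =====
-- def create_sys_of_eqns(actor_names, full_data):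
--     # Visit only the keys actually present in each sample (instead of scanning all
--     # actors per sample); an actor's 0-bucket is filled in batches from the gap of
--     # skipped samples, added when the actor next appears or the interval ends.
--     # A duplicated actor name weights that actor's increments by its multiplicity.
--     weight = {}
--     for a in actor_names:
--         weight[a] = weight.get(a, 0) + 1
--     sys_eqns_lhs = {a: [] for a in actor_names}
--     sys_eqns_rhs = []
--     for interval in full_data:
--         n = len(interval)
--         curr = {a: {} for a in actor_names}
--         seen = {a: 0 for a in actor_names}
--         for i, sample in enumerate(interval):
--             for k, v in sample.items():
--                 if k in weight:
--                     d = curr[k]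
--                     wk = weight[k]
--                     gap = i - seen[k]
--                     if gap:
--                         d[0] = d.get(0, 0) + gap * wk
--                     d[v] = d.get(v, 0) + wk
--                     seen[k] = i + 1
--         for a, d in curr.items():
--             gap = n - seen[a]
--             if gap:
--                 d[0] = d.get(0, 0) + gap * weight[a]
--             sys_eqns_lhs[a].append(d)
--         sys_eqns_rhs.append(n)
--     return sys_eqns_lhs, sys_eqns_rhs
-- ===== Notes on version B (the rewrite author's own statement) =====
-- stated objective: faster
-- what changed: Instead of scanning every actor for every sample with per-occurrence dict increments, B iterates only the keys actually present in each sample (weighted by the actor's multiplicity in actor_names) and fills each actor's 0-bucket in batches, adding the gap of skipped samples when the actor next appears or when the interval ends.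
import Mathlib
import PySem

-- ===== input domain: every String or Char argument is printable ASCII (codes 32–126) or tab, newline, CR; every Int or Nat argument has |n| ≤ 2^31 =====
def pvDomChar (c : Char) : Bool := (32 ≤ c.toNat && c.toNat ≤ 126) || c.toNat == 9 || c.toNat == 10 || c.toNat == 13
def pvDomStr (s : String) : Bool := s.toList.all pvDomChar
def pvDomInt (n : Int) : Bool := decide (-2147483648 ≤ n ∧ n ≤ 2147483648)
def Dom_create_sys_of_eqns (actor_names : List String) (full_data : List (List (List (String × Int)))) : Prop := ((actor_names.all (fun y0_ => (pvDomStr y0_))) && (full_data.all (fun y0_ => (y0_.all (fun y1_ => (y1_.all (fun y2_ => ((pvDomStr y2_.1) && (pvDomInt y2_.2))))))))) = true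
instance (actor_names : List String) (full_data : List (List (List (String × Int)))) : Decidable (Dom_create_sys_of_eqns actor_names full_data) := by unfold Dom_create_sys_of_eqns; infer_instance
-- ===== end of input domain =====

-- B replaces A's per-sample scan over ALL actors by a scan over the keys actually present in
-- each sample, filling each actor's 0-bucket in batches from the gap of skipped samples.

-- ===== PORT A =====
-- one step of A's inner 'for actor_name in actor_names' loop over one sample
def pvStepA (sample : List (String × Int)) (c : PySem.Dict String (PySem.Dict Int Int)) (a : String) :
    PySem.Dict String (PySem.Dict Int Int) :=
  match (PySem.Dict.mk sample).get? a with
  | some v =>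
      let d := c.getD a PySem.Dict.empty      -- curr_eqn[actor_name]: key always present
      if d.contains v then c.insert a (d.insert v (d.getD v 0 + 1))
      else c.insert a (d.insert v 1)
  | none =>
      let d := c.getD a PySem.Dict.empty
      if d.contains 0 then c.insert a (d.insert 0 (d.getD 0 0 + 1))
      else c.insert a (d.insert 0 1)

def create_sys_of_eqns (actor_names : List String) (full_data : List (List (List (String × Int)))) :
    (List (String × List (List (Int × Int)))) × List Int :=
  let lhs0 : PySem.Dict String (List (PySem.Dict Int Int)) :=
    actor_names.foldl (fun d a => d.insert a []) PySem.Dict.empty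
  let st := full_data.foldl
    (fun (st : PySem.Dict String (List (PySem.Dict Int Int)) × List Int) interval =>
      let n : Int := interval.length
      let curr0 : PySem.Dict String (PySem.Dict Int Int) :=
        actor_names.foldl (fun c a => c.insert a PySem.Dict.empty) PySem.Dict.empty
      let curr := interval.foldl (fun c sample => actor_names.foldl (pvStepA sample) c) curr0
      -- for actor_name in curr_eqn: sys_eqns_lhs[actor_name].append(curr_eqn[actor_name])
      let lhs' := curr.items.foldl (fun l p => l.insert p.1 (l.getD p.1 [] ++ [p.2])) st.1
      (lhs', st.2 ++ [n])) (lhs0, [])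
  (st.1.items.map (fun p => (p.1, p.2.map PySem.Dict.items)), st.2)

-- ===== PORT B =====
-- if gap: d[0] = d.get(0, 0) + gap * w
def pvGap0W (d : PySem.Dict Int Int) (gap : Int) (w : Int) : PySem.Dict Int Int :=
  if gap ≠ 0 then d.insert 0 (d.getD 0 0 + gap * w) else d

-- d[v] = d.get(v, 0) + w
def pvUpdW (d : PySem.Dict Int Int) (k : Int) (w : Int) : PySem.Dict Int Int :=
  d.insert k (d.getD k 0 + w)

-- body of Source B's 'for k, v in sample.items()' loop
def pvStepB (weight : PySem.Dict String Int) (i : Int)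
    (st : PySem.Dict String (PySem.Dict Int Int) × PySem.Dict String Int)
    (kv : String × Int) :
    PySem.Dict String (PySem.Dict Int Int) × PySem.Dict String Int :=
  if weight.contains kv.1 then
    (st.1.insert kv.1
      (pvUpdW (pvGap0W (st.1.getD kv.1 PySem.Dict.empty) (i - st.2.getD kv.1 0) (weight.getD kv.1 0))
        kv.2 (weight.getD kv.1 0)),
     st.2.insert kv.1 (i + 1))
  else st

def create_sys_of_eqns_alt (actor_names : List String) (full_data : List (List (List (String × Int)))) :
    (List (String × List (List (Int × Int)))) × List Int :=
  let weight : PySem.Dict String Int :=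
    actor_names.foldl (fun d a => d.insert a (d.getD a 0 + 1)) PySem.Dict.empty
  let lhs0 : PySem.Dict String (List (PySem.Dict Int Int)) :=
    actor_names.foldl (fun d a => d.insert a []) PySem.Dict.empty
  let st := full_data.foldl
    (fun (st : PySem.Dict String (List (PySem.Dict Int Int)) × List Int) interval =>
      let n : Int := interval.length
      let curr0 : PySem.Dict String (PySem.Dict Int Int) :=
        actor_names.foldl (fun c a => c.insert a PySem.Dict.empty) PySem.Dict.empty
      let seen0 : PySem.Dict String Int :=
        actor_names.foldl (fun c a => c.insert a 0) PySem.Dict.empty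
      let cs := (PySem.List.enumerate interval 0).foldl
        (fun st2 p => p.2.foldl (pvStepB weight p.1) st2) (curr0, seen0)
      -- for a, d in curr.items(): flush the tail gap into d[0], then lhs[a].append(d)
      let lhs' := cs.1.items.foldl (fun l p =>
          l.insert p.1 (l.getD p.1 [] ++ [pvGap0W p.2 (n - cs.2.getD p.1 0) (weight.getD p.1 0)])) st.1
      (lhs', st.2 ++ [n])) (lhs0, [])
  (st.1.items.map (fun p => (p.1, p.2.map PySem.Dict.items)), st.2)

-- ===== PRECONDITION & SPEC =====
-- Pre_ excludes only association lists in which a sample carries duplicate keys: such a value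
-- does not represent a Python dict (the declared sample type), so neither behaviour is specified.
def Pre_create_sys_of_eqns (actor_names : List String) (full_data : List (List (List (String × Int)))) : Prop :=
  ∀ I ∈ full_data, ∀ s ∈ I, (s.map Prod.fst).Nodup
instance (actor_names : List String) (full_data : List (List (List (String × Int)))) : Decidable (Pre_create_sys_of_eqns actor_names full_data) := by unfold Pre_create_sys_of_eqns; infer_instance

def pvWitness_create_sys_of_eqns : List String × (List (List (List (String × Int)))) :=
  (["cpu", "net"], [[[("cpu", 5)], []], [[("net", 0), ("cpu", 5)]]])

def Spec_create_sys_of_eqns (actor_names : List String) (full_data : List (List (List (String × Int)))) (out : (List (String × List (List (Int × Int)))) × List Int) : Prop := out = create_sys_of_eqns_alt actor_names full_data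
instance (actor_names : List String) (full_data : List (List (List (String × Int)))) (out : (List (String × List (List (Int × Int)))) × List Int) : Decidable (Spec_create_sys_of_eqns actor_names full_data out) := by unfold Spec_create_sys_of_eqns; infer_instance

-- ===== CLAIM (what is proved, stated in full; the proofs are below) =====
def Claim_equal_create_sys_of_eqns : Prop := ∀ (actor_names : List String) (full_data : List (List (List (String × Int)))), Dom_create_sys_of_eqns actor_names full_data → Pre_create_sys_of_eqns actor_names full_data → Spec_create_sys_of_eqns actor_names full_data (create_sys_of_eqns actor_names full_data)

-- ===== LEMMAS AND PROOFS =====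

def pvMk {α : Type} (names : List String) (g : String → α) : PySem.Dict String α :=
  PySem.Dict.mk (names.map (fun a => (a, g a)))

def pvUpd (d : PySem.Dict Int Int) (k : Int) : PySem.Dict Int Int := d.insert k (d.getD k 0 + 1)

def pvKey (a : String) (s : List (String × Int)) : Int := ((PySem.Dict.mk s).get? a).getD 0

def pvCntW (a : String) (m : Int) (I : List (List (String × Int))) : PySem.Dict Int Int :=
  (I.map (pvKey a)).foldl (fun d k => pvUpdW d k m) PySem.Dict.empty

theorem pv_contains_mk_of_mem {α : Type} (l : List (String × α)) (a : String)
    (h : a ∈ l.map Prod.fst) : (PySem.Dict.mk l).contains a = true := by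
  rw [PySem.Dict.contains_eq_decide_mem_keys]
  simpa [PySem.Dict.keys] using h

theorem pv_contains_mk_of_not_mem {α : Type} (l : List (String × α)) (a : String)
    (h : a ∉ l.map Prod.fst) : (PySem.Dict.mk l).contains a = false := by
  rw [PySem.Dict.contains_eq_decide_mem_keys]
  simpa [PySem.Dict.keys] using h

theorem pv_insert_mk_mem {α : Type} (l : List (String × α)) (a : String) (y : α)
    (h : a ∈ l.map Prod.fst) :
    (PySem.Dict.mk l).insert a y
      = PySem.Dict.mk (l.map (fun p => if p.1 == a then (a, y) else p)) := by
  apply PySem.Dict.ext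
  rw [PySem.Dict.items_insert_of_contains _ y (pv_contains_mk_of_mem l a h)]

theorem pv_insert_mk_fresh {α : Type} (l : List (String × α)) (a : String) (y : α)
    (h : a ∉ l.map Prod.fst) :
    (PySem.Dict.mk l).insert a y = PySem.Dict.mk (l ++ [(a, y)]) := by
  apply PySem.Dict.ext
  rw [PySem.Dict.items_insert_of_not_contains _ y (pv_contains_mk_of_not_mem l a h)]

theorem pv_get?_pvMk {α : Type} (names : List String) (g : String → α) (a : String)
    (h : a ∈ names) : (pvMk names g).get? a = some (g a) := by
  induction names with
  | nil => cases h
  | cons b rest ih =>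
      unfold pvMk
      rw [List.map_cons, PySem.Dict.get?_mk_cons]
      by_cases hb : b = a
      · subst hb; simp
      · simp only [beq_iff_eq, hb, if_false]
        rcases List.mem_cons.mp h with h' | h'
        · exact absurd h'.symm hb
        · exact ih h'

theorem pv_getD_pvMk {α : Type} (names : List String) (g : String → α) (a : String) (d0 : α)
    (h : a ∈ names) : (pvMk names g).getD a d0 = g a := by
  rw [PySem.Dict.getD_eq_get?_getD, pv_get?_pvMk names g a h]; rfl

theorem pvMk_congr {α : Type} (names : List String) (g g' : String → α)
    (h : ∀ a ∈ names, g a = g' a) : pvMk names g = pvMk names g' := by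
  unfold pvMk
  congr 1
  exact List.map_congr_left (fun a ha => by rw [h a ha])

theorem pv_insert_pvMk {α : Type} (names : List String) (g : String → α) (a : String) (y : α)
    (h : a ∈ names) :
    (pvMk names g).insert a y = pvMk names (fun b => if b = a then y else g b) := by
  unfold pvMk
  rw [pv_insert_mk_mem _ a y (by simpa [List.map_map, Function.comp] using h)]
  congr 1
  rw [List.map_map]
  apply List.map_congr_left
  intro b _
  by_cases hb : b = a
  · subst hb; simp
  · simp [hb]

theorem pv_fold_pointwise_dup {α : Type} (f : String → α → α) (d0 : α) :
    ∀ (names U : List String), (∀ a ∈ names, a ∈ U) → ∀ (g : String → α),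
      names.foldl (fun c a => c.insert a (f a (c.getD a d0))) (pvMk U g)
        = pvMk U (fun a => (f a)^[names.count a] (g a)) := by
  intro names
  induction names with
  | nil =>
      intro U _ g
      simp only [List.foldl_nil]
      apply pvMk_congr
      intro a _
      simp
  | cons b rest ih =>
      intro U hsub g
      simp only [List.foldl_cons]
      rw [pv_getD_pvMk U g b d0 (hsub b (List.mem_cons_self)),
        pv_insert_pvMk U g b _ (hsub b (List.mem_cons_self)),
        ih U (fun a ha => hsub a (List.mem_cons_of_mem b ha)) _]
      apply pvMk_congr
      intro a _
      by_cases hab : a = b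
      · subst hab
        simp [List.count_cons_self, Function.iterate_succ_apply]
      · simp [Ne.symm hab, hab]

theorem pv_fold_build_const {α : Type} (x0 : α) :
    ∀ (names S : List String), S.Nodup →
      names.foldl (fun d a => d.insert a x0) (pvMk S (fun _ => x0))
        = pvMk (PySem.Set.update S names) (fun _ => x0) := by
  intro names
  induction names with
  | nil => intro S _; rw [List.foldl_nil, PySem.Set.update_nil]
  | cons b rest ih =>
      intro S hS
      simp only [List.foldl_cons]
      rw [PySem.Set.update_cons]
      by_cases hb : b ∈ S
      · rw [pv_insert_pvMk S _ b _ hb,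
          pvMk_congr S _ (fun _ => x0) (fun a _ => by split <;> rfl),
          PySem.Set.add_of_mem hb, ih S hS]
      · have hfresh : (pvMk S (fun _ => x0)).insert b x0 = pvMk (S ++ [b]) (fun _ => x0) := by
          unfold pvMk
          rw [pv_insert_mk_fresh _ b x0 (by simpa [List.map_map, Function.comp] using hb),
            List.map_append]
          rfl
        rw [hfresh, PySem.Set.add_of_not_mem hb,
          ih (S ++ [b]) (hS.append (List.nodup_singleton b)
            (by intro x hx hx2; simp at hx2; exact hb (hx2 ▸ hx)))]

theorem pv_fold_build_const0 {α : Type} (x0 : α) (names : List String) :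
    names.foldl (fun d a => d.insert a x0) PySem.Dict.empty
      = pvMk (PySem.Set.ofList names) (fun _ => x0) := by
  have h := pv_fold_build_const x0 names [] List.nodup_nil
  rw [show pvMk [] (fun _ => x0) = (PySem.Dict.empty : PySem.Dict String α) from rfl] at h
  rw [h, PySem.Set.update_nil_left]

theorem pv_updW_iterate (k : Int) :
    ∀ (m : Nat), 1 ≤ m → ∀ (d : PySem.Dict Int Int),
      (fun x => pvUpd x k)^[m] d = pvUpdW d k (m : Int) := by
  intro m
  induction m with
  | zero => intro h; omega
  | succ mm ih =>
      intro _ d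
      by_cases hmm : 1 ≤ mm
      · rw [Function.iterate_succ_apply, ih hmm]
        unfold pvUpd pvUpdW
        rw [PySem.Dict.getD_insert_self, PySem.Dict.insert_insert_self]
        congr 1
        push_cast
        ring
      · have : mm = 0 := by omega
        subst this
        unfold pvUpd pvUpdW
        simp

theorem pv_if_upd (d : PySem.Dict Int Int) (v : Int) :
    (if d.contains v then d.insert v (d.getD v 0 + 1) else d.insert v 1) = pvUpd d v := by
  unfold pvUpd
  by_cases hc : d.contains v = true
  · rw [if_pos hc]
  · rw [if_neg hc, PySem.Dict.getD_of_not_contains _ _ (Bool.not_eq_true _ ▸ hc)]; norm_num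

theorem pv_stepA_eq (s : List (String × Int)) (c : PySem.Dict String (PySem.Dict Int Int))
    (a : String) :
    pvStepA s c a = c.insert a (pvUpd (c.getD a PySem.Dict.empty) (pvKey a s)) := by
  unfold pvStepA pvKey
  cases hv : (PySem.Dict.mk s).get? a with
  | some v => simp only [Option.getD_some, ← pv_if_upd, apply_ite (c.insert a)]
  | none => simp only [Option.getD_none, ← pv_if_upd, apply_ite (c.insert a)]

theorem pv_interval_A (names : List String) :
    ∀ (I : List (List (String × Int))) (g : String → PySem.Dict Int Int),
      I.foldl (fun c sample => names.foldl (pvStepA sample) c) (pvMk (PySem.Set.ofList names) g)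
        = pvMk (PySem.Set.ofList names)
            (fun a => (I.map (pvKey a)).foldl (fun d k => pvUpdW d k (names.count a)) (g a)) := by
  intro I
  induction I with
  | nil => intro g; simp
  | cons s rest ih =>
      intro g
      simp only [List.foldl_cons]
      have hs : names.foldl (pvStepA s) (pvMk (PySem.Set.ofList names) g)
          = pvMk (PySem.Set.ofList names) (fun a => pvUpdW (g a) (pvKey a s) (names.count a)) := by
        have hfn : pvStepA s = fun c a => c.insert a ((fun b d => pvUpd d (pvKey b s)) a (c.getD a PySem.Dict.empty)) := by
          funext c a; exact pv_stepA_eq s c a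
        rw [hfn, pv_fold_pointwise_dup (fun b d => pvUpd d (pvKey b s)) PySem.Dict.empty names
          (PySem.Set.ofList names) (fun a ha => (PySem.Set.mem_ofList _ _).mpr ha) g]
        apply pvMk_congr
        intro a ha
        have hcnt : 1 ≤ names.count a :=
          List.count_pos_iff.mpr ((PySem.Set.mem_ofList _ _).mp ha)
        exact pv_updW_iterate (pvKey a s) (names.count a) hcnt (g a)
      rw [hs, ih]
      apply pvMk_congr
      intro a _
      simp

def pvBF (a : String) (m : Int) : List (List (String × Int)) → Int → PySem.Dict Int Int → Int →
    PySem.Dict Int Int × Int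
  | [], _, g, h => (g, h)
  | s :: rest, i, g, h =>
    match (PySem.Dict.mk s).get? a with
    | some v => pvBF a m rest (i + 1) (pvUpdW (pvGap0W g (i - h) m) v m) (i + 1)
    | none => pvBF a m rest (i + 1) g h

theorem pvBF_cons (a : String) (m : Int) (s : List (String × Int))
    (rest : List (List (String × Int))) (i : Int) (g : PySem.Dict Int Int) (h : Int) :
    pvBF a m (s :: rest) i g h
      = match (PySem.Dict.mk s).get? a with
        | some v => pvBF a m rest (i + 1) (pvUpdW (pvGap0W g (i - h) m) v m) (i + 1)
        | none => pvBF a m rest (i + 1) g h := rfl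

theorem pv_gap0W_zero (g : PySem.Dict Int Int) (m : Int) : pvGap0W g 0 m = g := by
  unfold pvGap0W; simp

theorem pv_gap_succ (g : PySem.Dict Int Int) (gap m : Int) (hm : 0 ≤ gap) :
    pvGap0W g (gap + 1) m = pvUpdW (pvGap0W g gap m) 0 m := by
  unfold pvGap0W pvUpdW
  by_cases h0 : gap = 0
  · subst h0; simp
  · have hg1 : gap + 1 ≠ 0 := by omega
    rw [if_pos hg1, if_pos h0, PySem.Dict.getD_insert_self, PySem.Dict.insert_insert_self]
    ring_nf

theorem pv_core (a : String) (m : Int) :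
    ∀ (I : List (List (String × Int))) (i h : Int) (g : PySem.Dict Int Int), h ≤ i →
      (pvBF a m I i g h).2 ≤ i + I.length ∧
      pvGap0W (pvBF a m I i g h).1 ((i + I.length) - (pvBF a m I i g h).2) m
        = (I.map (pvKey a)).foldl (fun d k => pvUpdW d k m) (pvGap0W g (i - h) m) := by
  intro I
  induction I with
  | nil =>
      intro i h g hh
      simp [pvBF, hh]
  | cons s rest ih =>
      intro i h g hh
      simp only [List.map_cons, List.foldl_cons, List.length_cons]
      cases hv : (PySem.Dict.mk s).get? a with
      | some v =>
          have hbf : pvBF a m (s :: rest) i g h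
              = pvBF a m rest (i + 1) (pvUpdW (pvGap0W g (i - h) m) v m) (i + 1) := by
            rw [pvBF_cons, hv]
          have hkey : pvKey a s = v := by unfold pvKey; rw [hv]; rfl
          obtain ⟨h1, h2⟩ := ih (i + 1) (i + 1) (pvUpdW (pvGap0W g (i - h) m) v m) (le_refl _)
          rw [hbf, hkey]
          push_cast
          constructor
          · omega
          · rw [show i + ((rest.length : Int) + 1) = i + 1 + (rest.length : Int) from by ring, h2,
              show i + 1 - (i + 1) = (0 : Int) from by ring, pv_gap0W_zero]
      | none =>
          have hbf : pvBF a m (s :: rest) i g h = pvBF a m rest (i + 1) g h := by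
            rw [pvBF_cons, hv]
          have hkey : pvKey a s = 0 := by unfold pvKey; rw [hv]; rfl
          obtain ⟨h1, h2⟩ := ih (i + 1) h g (by omega)
          rw [hbf, hkey]
          push_cast
          constructor
          · omega
          · rw [show i + ((rest.length : Int) + 1) = i + 1 + (rest.length : Int) from by ring, h2,
              show i + 1 - h = (i - h) + 1 from by ring, pv_gap_succ g (i - h) m (by omega)]

theorem pv_sample_fold (names : List String) (i : Int) :
    ∀ (s : List (String × Int)) (g : String → PySem.Dict Int Int) (h : String → Int),
      (s.map Prod.fst).Nodup →
      s.foldl (pvStepB (PySem.Dict.counter names) i)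
          (pvMk (PySem.Set.ofList names) g, pvMk (PySem.Set.ofList names) h)
        = (pvMk (PySem.Set.ofList names) (fun a => match (PySem.Dict.mk s).get? a with
             | some v => pvUpdW (pvGap0W (g a) (i - h a) (names.count a)) v (names.count a)
             | none => g a),
           pvMk (PySem.Set.ofList names)
             (fun a => if ((PySem.Dict.mk s).get? a).isSome then i + 1 else h a)) := by
  intro s
  induction s with
  | nil =>
      intro g h _
      simp only [List.foldl_nil]
      apply congrArg₂ Prod.mk <;> · apply pvMk_congr; intro a _; rfl
  | cons kv rest ih =>
      intro g h hnodup
      obtain ⟨k, v⟩ := kv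
      simp only [List.map_cons, List.nodup_cons] at hnodup
      obtain ⟨hkrest, hrestnd⟩ := hnodup
      by_cases hk : k ∈ names
      · have hkU : k ∈ PySem.Set.ofList names := (PySem.Set.mem_ofList _ _).mpr hk
        have hcont : (PySem.Dict.counter names).contains k = true := by
          rw [PySem.Dict.contains_counter]
          simpa using hk
        have hw : (PySem.Dict.counter names).getD k 0 = (names.count k : Int) :=
          PySem.Dict.getD_counter names k
        have hstep : pvStepB (PySem.Dict.counter names) i
              (pvMk (PySem.Set.ofList names) g, pvMk (PySem.Set.ofList names) h) (k, v)
            = (pvMk (PySem.Set.ofList names)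
                 (fun b => if b = k then pvUpdW (pvGap0W (g k) (i - h k) (names.count k)) v (names.count k) else g b),
               pvMk (PySem.Set.ofList names) (fun b => if b = k then i + 1 else h b)) := by
          unfold pvStepB
          rw [if_pos hcont]
          show ((pvMk (PySem.Set.ofList names) g).insert k
              (pvUpdW (pvGap0W ((pvMk (PySem.Set.ofList names) g).getD k PySem.Dict.empty)
                  (i - (pvMk (PySem.Set.ofList names) h).getD k 0)
                  ((PySem.Dict.counter names).getD k 0))
                v ((PySem.Dict.counter names).getD k 0)),
            (pvMk (PySem.Set.ofList names) h).insert k (i + 1)) = _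
          rw [hw, pv_getD_pvMk _ g k PySem.Dict.empty hkU, pv_getD_pvMk _ h k 0 hkU,
            pv_insert_pvMk _ g k _ hkU, pv_insert_pvMk _ h k _ hkU]
        simp only [List.foldl_cons, hstep]
        rw [ih _ _ hrestnd]
        apply congrArg₂ Prod.mk
        · apply pvMk_congr
          intro a _
          rw [PySem.Dict.get?_mk_cons]
          by_cases hak : k = a
          · subst hak
            have hnone : (PySem.Dict.mk rest).get? k = none := by
              rw [PySem.Dict.get?_eq_none_iff_not_mem_keys]
              simpa [PySem.Dict.keys] using hkrest
            simp [hnone]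
          · simp only [beq_iff_eq, hak, if_false, if_neg (Ne.symm hak)]
        · apply pvMk_congr
          intro a _
          rw [PySem.Dict.get?_mk_cons]
          by_cases hak : k = a
          · subst hak
            have hnone : (PySem.Dict.mk rest).get? k = none := by
              rw [PySem.Dict.get?_eq_none_iff_not_mem_keys]
              simpa [PySem.Dict.keys] using hkrest
            simp [hnone]
          · simp only [beq_iff_eq, hak, if_false, if_neg (Ne.symm hak)]
      · have hcont : ¬ (PySem.Dict.counter names).contains k = true := by
          rw [PySem.Dict.contains_counter]
          simpa using hk
        have hstep : pvStepB (PySem.Dict.counter names) i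
              (pvMk (PySem.Set.ofList names) g, pvMk (PySem.Set.ofList names) h) (k, v)
            = (pvMk (PySem.Set.ofList names) g, pvMk (PySem.Set.ofList names) h) := by
          unfold pvStepB
          rw [if_neg hcont]
        simp only [List.foldl_cons, hstep]
        rw [ih _ _ hrestnd]
        apply congrArg₂ Prod.mk
        · apply pvMk_congr
          intro a ha
          rw [PySem.Dict.get?_mk_cons]
          have hka : k ≠ a := fun e => hk (e ▸ (PySem.Set.mem_ofList _ _).mp ha)
          simp [hka]
        · apply pvMk_congr
          intro a ha
          rw [PySem.Dict.get?_mk_cons]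
          have hka : k ≠ a := fun e => hk (e ▸ (PySem.Set.mem_ofList _ _).mp ha)
          simp [hka]

theorem pv_enum_fold (names : List String) :
    ∀ (I : List (List (String × Int))) (i : Int) (g : String → PySem.Dict Int Int)
      (h : String → Int),
      (∀ s ∈ I, (s.map Prod.fst).Nodup) →
      (PySem.List.enumerate I i).foldl
          (fun st2 p => p.2.foldl (pvStepB (PySem.Dict.counter names) p.1) st2)
          (pvMk (PySem.Set.ofList names) g, pvMk (PySem.Set.ofList names) h)
        = (pvMk (PySem.Set.ofList names)
             (fun a => (pvBF a (names.count a) I i (g a) (h a)).1),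
           pvMk (PySem.Set.ofList names)
             (fun a => (pvBF a (names.count a) I i (g a) (h a)).2)) := by
  intro I
  induction I with
  | nil =>
      intro i g h _
      rw [PySem.List.enumerate_nil]
      simp only [List.foldl_nil]
      apply congrArg₂ Prod.mk <;> rfl
  | cons s rest ih =>
      intro i g h hnds
      rw [PySem.List.enumerate_cons, List.foldl_cons]
      rw [pv_sample_fold names i s g h (hnds s (List.mem_cons_self))]
      rw [ih (i + 1) _ _ (fun t ht => hnds t (List.mem_cons_of_mem s ht))]
      apply congrArg₂ Prod.mk <;>
        · apply pvMk_congr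
          intro a _
          rw [pvBF_cons]
          cases (PySem.Dict.mk s).get? a <;> rfl

theorem pv_outer (U : List String)
    (step : PySem.Dict String (List (PySem.Dict Int Int)) × List Int
      → List (List (String × Int)) → PySem.Dict String (List (PySem.Dict Int Int)) × List Int)
    (F : List (List (String × Int)) → String → PySem.Dict Int Int) :
    ∀ (data : List (List (List (String × Int)))),
      (∀ I ∈ data, ∀ (g : String → List (PySem.Dict Int Int)) (r : List Int),
        step (pvMk U g, r) I
          = (pvMk U (fun a => g a ++ [F I a]), r ++ [(I.length : Int)])) →
      ∀ (g : String → List (PySem.Dict Int Int)) (r : List Int),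
      data.foldl step (pvMk U g, r)
        = (pvMk U (fun a => g a ++ data.map (fun I => F I a)),
           r ++ data.map (fun I => (I.length : Int))) := by
  intro data
  induction data with
  | nil =>
      intro _ g r
      simp only [List.foldl_nil, List.map_nil, List.append_nil]
  | cons I rest ih =>
      intro hstep g r
      simp only [List.foldl_cons, List.map_cons]
      rw [hstep I (List.mem_cons_self) g r,
        ih (fun J hJ => hstep J (List.mem_cons_of_mem I hJ)) _ _]
      apply congrArg₂ Prod.mk
      · apply pvMk_congr; intro a _; rw [List.append_assoc]; rfl
      · rw [List.append_assoc]; rfl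

theorem pv_main (actor_names : List String) (full_data : List (List (List (String × Int))))
    (hs : ∀ I ∈ full_data, ∀ s ∈ I, (s.map Prod.fst).Nodup) :
    create_sys_of_eqns actor_names full_data = create_sys_of_eqns_alt actor_names full_data := by
  simp only [create_sys_of_eqns, create_sys_of_eqns_alt,
    PySem.Dict.foldl_insert_getD_add_one_eq_counter]
  rw [pv_fold_build_const0 ([] : List (PySem.Dict Int Int)) actor_names]
  rw [pv_outer (PySem.Set.ofList actor_names) _
      (fun I a => pvCntW a ((actor_names.count a : Int)) I) full_data ?hA _ [],
    pv_outer (PySem.Set.ofList actor_names) _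
      (fun I a => pvCntW a ((actor_names.count a : Int)) I) full_data ?hB _ []]
  case hA =>
    intro I _ g r
    rw [pv_fold_build_const0 PySem.Dict.empty actor_names,
      pv_interval_A actor_names I (fun _ => PySem.Dict.empty)]
    apply congrArg₂ Prod.mk
    · show (((PySem.Set.ofList actor_names).map
          (fun a => (a, (I.map (pvKey a)).foldl (fun d k => pvUpdW d k (actor_names.count a)) PySem.Dict.empty))).foldl
          (fun l p => l.insert p.1 (l.getD p.1 [] ++ [p.2])) (pvMk (PySem.Set.ofList actor_names) g)) = _
      rw [List.foldl_map]
      rw [pv_fold_pointwise_dup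
        (fun a x => x ++ [(I.map (pvKey a)).foldl (fun d k => pvUpdW d k (actor_names.count a)) PySem.Dict.empty])
        [] (PySem.Set.ofList actor_names) (PySem.Set.ofList actor_names) (fun a ha => ha) g]
      apply pvMk_congr
      intro a ha
      rw [List.count_eq_one_of_mem (PySem.Set.nodup_ofList actor_names) ha]
      rfl
    · rfl
  case hB =>
    intro I hI g r
    rw [pv_fold_build_const0 PySem.Dict.empty actor_names,
      pv_fold_build_const0 (0 : Int) actor_names,
      pv_enum_fold actor_names I 0 (fun _ => PySem.Dict.empty) (fun _ => 0) (hs I hI)]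
    simp only []
    apply congrArg₂ Prod.mk
    · show (((PySem.Set.ofList actor_names).map
          (fun a => (a, (pvBF a (actor_names.count a) I 0 PySem.Dict.empty 0).1))).foldl
          (fun l p => l.insert p.1 (l.getD p.1 [] ++
            [pvGap0W p.2
              ((I.length : Int) - (pvMk (PySem.Set.ofList actor_names)
                (fun a => (pvBF a (actor_names.count a) I 0 PySem.Dict.empty 0).2)).getD p.1 0)
              ((PySem.Dict.counter actor_names).getD p.1 0)]))
          (pvMk (PySem.Set.ofList actor_names) g)) = _
      rw [List.foldl_map]
      rw [pv_fold_pointwise_dup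
        (fun a x => x ++
            [pvGap0W (pvBF a (actor_names.count a) I 0 PySem.Dict.empty 0).1
              ((I.length : Int) - (pvMk (PySem.Set.ofList actor_names)
                (fun b => (pvBF b (actor_names.count b) I 0 PySem.Dict.empty 0).2)).getD a 0)
              ((PySem.Dict.counter actor_names).getD a 0)])
        [] (PySem.Set.ofList actor_names) (PySem.Set.ofList actor_names) (fun a ha => ha) g]
      apply pvMk_congr
      intro a ha
      rw [List.count_eq_one_of_mem (PySem.Set.nodup_ofList actor_names) ha]
      show g a ++ [pvGap0W (pvBF a (actor_names.count a) I 0 PySem.Dict.empty 0).1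
          ((I.length : Int) - (pvMk (PySem.Set.ofList actor_names)
            (fun b => (pvBF b (actor_names.count b) I 0 PySem.Dict.empty 0).2)).getD a 0)
          ((PySem.Dict.counter actor_names).getD a 0)] = _
      rw [pv_getD_pvMk _ _ a 0 ha, PySem.Dict.getD_counter]
      have hc := (pv_core a (actor_names.count a) I 0 0 PySem.Dict.empty (le_refl 0)).2
      rw [zero_add] at hc
      rw [show (0 : Int) - 0 = 0 from by ring, pv_gap0W_zero] at hc
      rw [hc]
      rfl
    · rfl

-- ===== VERDICT (by name: the statement is the Claim_ definition above) =====
theorem create_sys_of_eqns_spec : Claim_equal_create_sys_of_eqns := by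
  intro actor_names full_data _ hpre
  unfold Spec_create_sys_of_eqns
  exact pv_main actor_names full_data hpre
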